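-- pv_equiv track=rewrite | github.com/kirankm/market-intelligence | newsfeed/processing/extraction.py | extract_body_by_heuristic
-- ===== SOURCE A (Python) =====
-- def extract_body_by_heuristic(text: str, min_paragraph_len: int = 80) -> str:
--     """Fallback: find the longest contiguous run of real paragraphs."""
--     lines = text.split('\n')
--     best_start, best_end, best_len = 0, 0, 0
--     curr_start, curr_len = None, 0
--
--     for i, line in enumerate(lines):
--         stripped = line.strip()
--         is_paragraph = len(stripped) >= min_paragraph_len and not stripped.startswith(('*', '-', '|', '#', '[', '!'))
--         if is_paragraph:
--             if curr_start is None: curr_start = i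
--             curr_len += len(stripped)
--         elif stripped == '':
--             continue
--         else:
--             if curr_len > best_len:
--                 best_start, best_end, best_len = curr_start or 0, i, curr_len
--             curr_start, curr_len = None, 0
--     if curr_len > best_len:
--         best_start, best_end = curr_start or 0, len(lines)
--     return '\n'.join(lines[best_start:best_end]).strip()
-- ===== SOURCE B (Python) =====
-- def extract_body_by_heuristic(text: str, min_paragraph_len: int = 80) -> str:
--     """Two-phase: split the lines into separator-delimited segments with their
--     accumulated paragraph length, then pick the heaviest segment with max()."""
--     lines = text.split('\n')
--     segs = []                      # records (paragraph_len_sum, start, end)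
--     first, total = None, 0
--     for i, line in enumerate(lines):
--         s = line.strip()
--         if len(s) >= min_paragraph_len and not s.startswith(('*', '-', '|', '#', '[', '!')):
--             if first is None:
--                 first = i
--             total += len(s)
--         elif s:                    # separator line closes the current segment
--             segs.append((total, 0 if first is None else first, i))
--             first, total = None, 0
--     segs.append((total, 0 if first is None else first, len(lines)))
--     best = max((seg for seg in segs if seg[0] > 0),
--                key=lambda seg: seg[0], default=(0, 0, 0))
--     return '\n'.join(lines[best[1]:best[2]]).strip()
-- ===== Notes on version B (the rewrite author's own statement) =====
-- stated objective: alternative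
-- what changed: A tracks the best run inline with best_start/best_end/best_len mutated inside the loop; B first materialises one record (accumulated paragraph length, start, end) per separator-delimited segment and then selects the heaviest record with a single max(..., default=...) call.
import Mathlib
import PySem

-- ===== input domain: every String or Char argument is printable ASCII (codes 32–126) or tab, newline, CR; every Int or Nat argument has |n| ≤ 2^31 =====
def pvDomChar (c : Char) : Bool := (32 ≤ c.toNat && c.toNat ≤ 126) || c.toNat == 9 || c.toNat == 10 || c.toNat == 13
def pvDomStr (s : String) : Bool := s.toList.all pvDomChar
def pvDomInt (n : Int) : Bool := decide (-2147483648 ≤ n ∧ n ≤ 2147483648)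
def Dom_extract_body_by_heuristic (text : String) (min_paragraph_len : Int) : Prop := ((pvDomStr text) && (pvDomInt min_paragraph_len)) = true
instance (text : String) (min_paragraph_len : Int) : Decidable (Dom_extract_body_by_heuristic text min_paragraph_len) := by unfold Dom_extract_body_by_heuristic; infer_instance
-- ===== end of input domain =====

-- B replaces A's inline best-run bookkeeping by a segment-record pass followed by a max() selection
-- (alternative decomposition, same O(n) cost).

-- shared per-line test: is_paragraph on the already-stripped line (identical expression in both Pythons)
def pvIsPara (min_paragraph_len : Int) (s : String) : Bool :=
  decide (min_paragraph_len ≤ PySem.Str.len s) &&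
  !(PySem.Str.startswith s "*" || PySem.Str.startswith s "-" || PySem.Str.startswith s "|" ||
    PySem.Str.startswith s "#" || PySem.Str.startswith s "[" || PySem.Str.startswith s "!")

-- ===== PORT A =====
-- A's loop; state = (best_start, best_end, best_len, curr_start, curr_len).
-- `curr_start or 0` is ported as cs.getD 0 (for cs = some 0 Python's `0 or 0` is also 0).
def pvLoopA (m : Int) : List String → Nat → Nat × Nat × Int × Option Nat × Int → Nat × Nat × Int × Option Nat × Int
  | [], _, st => st
  | l :: ls, i, (bs, be, bl, cs, cl) =>
    let s := PySem.Str.strip l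
    if pvIsPara m s then
      pvLoopA m ls (i + 1) (bs, be, bl, some (cs.getD i), cl + PySem.Str.len s)
    else if s = "" then
      pvLoopA m ls (i + 1) (bs, be, bl, cs, cl)
    else
      if bl < cl then
        pvLoopA m ls (i + 1) (cs.getD 0, i, cl, none, 0)
      else
        pvLoopA m ls (i + 1) (bs, be, bl, none, 0)

def extract_body_by_heuristic (text : String) (min_paragraph_len : Int) : String :=
  let lines := (PySem.Str.split? text "\n").getD []   -- separator "\n" ≠ "": split? is always some
  let st := pvLoopA min_paragraph_len lines 0 (0, 0, 0, none, 0)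
  let best := if st.2.2.1 < st.2.2.2.2 then (st.2.2.2.1.getD 0, lines.length) else (st.1, st.2.1)
  PySem.Str.strip (PySem.Str.join "\n" (PySem.List.slice lines (some (best.1 : Int)) (some (best.2 : Int))))

-- ===== PORT B =====
-- B's first pass: one record (total paragraph length, start, end) per separator-delimited segment.
def pvSegs (m : Int) : List String → Nat → Option Nat → Int → List (Int × Nat × Nat)
  | [], i, first, total => [(total, first.getD 0, i)]
  | l :: ls, i, first, total =>
    let s := PySem.Str.strip l
    if pvIsPara m s then
      pvSegs m ls (i + 1) (some (first.getD i)) (total + PySem.Str.len s)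
    else if s = "" then
      pvSegs m ls (i + 1) first total
    else
      (total, first.getD 0, i) :: pvSegs m ls (i + 1) none 0

def extract_body_by_heuristic_alt (text : String) (min_paragraph_len : Int) : String :=
  let lines := (PySem.Str.split? text "\n").getD []   -- separator "\n" ≠ "": split? is always some
  let segs := pvSegs min_paragraph_len lines 0 none 0
  -- max((seg for seg in segs if seg[0] > 0), key=lambda seg: seg[0], default=(0, 0, 0))
  let best := PySem.List.maxD (segs.filter (fun t => 0 < t.1)) (fun t => t.1) (0, 0, 0)
  PySem.Str.strip (PySem.Str.join "\n" (PySem.List.slice lines (some (best.2.1 : Int)) (some (best.2.2 : Int))))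

-- ===== PRECONDITION & SPEC =====
def Spec_extract_body_by_heuristic (text : String) (min_paragraph_len : Int) (out : String) : Prop := out = extract_body_by_heuristic_alt text min_paragraph_len
instance (text : String) (min_paragraph_len : Int) (out : String) : Decidable (Spec_extract_body_by_heuristic text min_paragraph_len out) := by unfold Spec_extract_body_by_heuristic; infer_instance

-- ===== CLAIM (what is proved, stated in full; the proofs are below) =====
def Claim_equal_extract_body_by_heuristic : Prop := ∀ (text : String) (min_paragraph_len : Int), Dom_extract_body_by_heuristic text min_paragraph_len → Spec_extract_body_by_heuristic text min_paragraph_len (extract_body_by_heuristic text min_paragraph_len)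

-- ===== LEMMAS AND PROOFS =====

-- A's selection step seen over records, and B's max? accumulator step.
def pvPick (acc : Nat × Nat × Int) (t : Int × Nat × Nat) : Nat × Nat × Int :=
  if acc.2.2 < t.1 then (t.2.1, t.2.2, t.1) else acc

def pvOptProj : Option (Int × Nat × Nat) → Nat × Nat × Int
  | none => (0, 0, 0)
  | some t => (t.2.1, t.2.2, t.1)

-- the fold that PySem.List.max? is (by definition)
def pvMaxStep (acc : Option (Int × Nat × Nat)) (t : Int × Nat × Nat) : Option (Int × Nat × Nat) :=
  match acc with
  | none => some t
  | some b => if b.1 < t.1 then some t else some b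

lemma pvMax?_eq_foldl (rs : List (Int × Nat × Nat)) :
    PySem.List.max? rs (fun t => t.1) = rs.foldl pvMaxStep none := by
  unfold PySem.List.max?
  congr 1
  funext acc t
  cases acc <;> rfl

-- A's loop, followed by the trailing flush, equals folding pvPick over B's segment records.
lemma pvLoopA_eq_segs (m : Int) (ls : List String) :
    ∀ (i bs be : Nat) (bl : Int) (cs : Option Nat) (cl : Int),
    (let st := pvLoopA m ls i (bs, be, bl, cs, cl)
     if st.2.2.1 < st.2.2.2.2 then (st.2.2.2.1.getD 0, i + ls.length) else (st.1, st.2.1))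
    = (let r := (pvSegs m ls i cs cl).foldl pvPick (bs, be, bl); (r.1, r.2.1)) := by
  induction ls with
  | nil =>
    intro i bs be bl cs cl
    simp only [pvLoopA, pvSegs, List.foldl, pvPick, List.length_nil, Nat.add_zero]
    split_ifs <;> simp
  | cons l ls ih =>
    intro i bs be bl cs cl
    simp only [pvLoopA, pvSegs]
    have hlen : i + (ls.length + 1) = (i + 1) + ls.length := by omega
    by_cases hp : pvIsPara m (PySem.Str.strip l)
    · simp only [if_pos hp]
      simpa [List.length_cons, hlen] using
        ih (i + 1) bs be bl (some (cs.getD i)) (cl + PySem.Str.len (PySem.Str.strip l))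
    · rw [if_neg hp, if_neg hp]
      by_cases hb : PySem.Str.strip l = ""
      · rw [if_pos hb, if_pos hb]
        simpa [List.length_cons, hlen] using ih (i + 1) bs be bl cs cl
      · rw [if_neg hb, if_neg hb, List.foldl_cons]
        by_cases hlt : bl < cl
        · rw [if_pos hlt]
          have hpick : pvPick (bs, be, bl) (cl, cs.getD 0, i) = (cs.getD 0, i, cl) := by
            simp [pvPick, hlt]
          rw [hpick]
          simpa [List.length_cons, hlen] using ih (i + 1) (cs.getD 0) i cl none 0
        · rw [if_neg hlt]
          have hpick : pvPick (bs, be, bl) (cl, cs.getD 0, i) = (bs, be, bl) := by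
            simp [pvPick, hlt]
          rw [hpick]
          simpa [List.length_cons, hlen] using ih (i + 1) bs be bl none 0

-- folding pvPick from a positive-weight state = first-max fold of the positive records, seeded
lemma pvPick_eq_max_pos (rs : List (Int × Nat × Nat)) :
    ∀ (b : Int × Nat × Nat), 0 < b.1 →
    rs.foldl pvPick (b.2.1, b.2.2, b.1)
      = pvOptProj ((rs.filter (fun t => 0 < t.1)).foldl pvMaxStep (some b)) := by
  induction rs with
  | nil => intro b _; rfl
  | cons t rs ih =>
    intro b hb
    by_cases ht : 0 < t.1
    · simp only [List.foldl, List.filter_cons, ht, decide_true, if_true, pvPick, pvMaxStep]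
      by_cases hlt : b.1 < t.1
      · simpa [hlt] using ih t ht
      · simpa [hlt] using ih b hb
    · have hskip : ¬ b.1 < t.1 := by omega
      simp only [List.foldl, List.filter_cons, ht, decide_false, if_false, pvPick, hskip]
      exact ih b hb

-- folding pvPick from the zero state = first-max fold of the positive records
lemma pvPick_eq_max (rs : List (Int × Nat × Nat)) :
    rs.foldl pvPick (0, 0, 0)
      = pvOptProj ((rs.filter (fun t => 0 < t.1)).foldl pvMaxStep none) := by
  induction rs with
  | nil => rfl
  | cons t rs ih =>
    by_cases ht : 0 < t.1
    · simp only [List.foldl, List.filter_cons, ht, decide_true, if_true, pvPick, pvMaxStep]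
      simpa [ht] using pvPick_eq_max_pos rs t ht
    · simp only [List.foldl, List.filter_cons, ht, decide_false, if_false, pvPick]
      exact ih

-- ===== VERDICT (by name: the statement is the Claim_ definition above) =====
theorem extract_body_by_heuristic_spec : Claim_equal_extract_body_by_heuristic := by
  intro text m _
  unfold Spec_extract_body_by_heuristic extract_body_by_heuristic extract_body_by_heuristic_alt
  set lines := (PySem.Str.split? text "\n").getD [] with hlines
  have h1 := pvLoopA_eq_segs m lines 0 0 0 0 none 0
  simp only [Nat.zero_add] at h1
  have h2 := pvPick_eq_max (pvSegs m lines 0 none 0)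
  have hbest :
      (let st := pvLoopA m lines 0 (0, 0, 0, none, 0)
       if st.2.2.1 < st.2.2.2.2 then (st.2.2.2.1.getD 0, lines.length) else (st.1, st.2.1))
      = (let b := PySem.List.maxD ((pvSegs m lines 0 none 0).filter (fun t => 0 < t.1)) (fun t => t.1) (0, 0, 0)
         (b.2.1, b.2.2)) := by
    rw [h1]
    unfold PySem.List.maxD
    rw [pvMax?_eq_foldl, h2]
    cases hfold : ((pvSegs m lines 0 none 0).filter (fun t => 0 < t.1)).foldl pvMaxStep none <;>
      simp [pvOptProj]
  simp only at hbest ⊢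
  rw [hbest]
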